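-- pv_equiv track=rewrite | github.com/abrahamlicona/route_recommendation_system | prob_functions.py | find_most_common_element
-- ===== SOURCE A (Python) =====
-- from collections import Counter
--
-- def find_most_common_element(trajectories, prefix):
--     """
--     Find the most common next element after the given prefix in the trajectories.
--     """
--     next_elements = []
--     prefix_len = len(prefix)
--     for trajectory in trajectories:
--         for i in range(len(trajectory) - prefix_len):
--             if trajectory[i:i+prefix_len] == prefix:
--                 next_elements.append(trajectory[i+prefix_len])
--     if next_elements:
--         return Counter(next_elements).most_common(1)[0][0]
--     return None
-- ===== SOURCE B (Python) =====
-- def find_most_common_element(trajectories, prefix):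
--     p = len(prefix)
--     # KMP failure table: fail[q] = length of the longest proper border of prefix[:q]
--     fail = [0] * (p + 1)
--     for q in range(2, p + 1):
--         b = fail[q - 1]
--         while b > 0 and prefix[b] != prefix[q - 1]:
--             b = fail[b]
--         fail[q] = b + 1 if prefix[b] == prefix[q - 1] else 0
--     counts = {}
--     for trajectory in trajectories:
--         q = 0
--         for c in trajectory:
--             if q == p:  # a full match ends just before c: c is its next element
--                 counts[c] = counts.get(c, 0) + 1
--             while q and (q == p or prefix[q] != c):
--                 q = fail[q]
--             if q < p and prefix[q] == c:
--                 q += 1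
--             else:
--                 q = 0
--     best = None
--     for x, n in counts.items():
--         if best is None or n > best[1]:
--             best = (x, n)
--     return best[0] if best is not None else None
-- ===== Notes on version B (the rewrite author's own statement) =====
-- stated objective: alternative
-- what changed: B replaces A's slide-a-window-and-compare-a-slice scan by a KMP automaton: a failure table for the prefix is built once, each trajectory is scanned in a single left-to-right pass whose state is the longest prefix-of-prefix matched so far, next elements are counted into a dict during the pass, and the winner is a single first-max scan instead of Counter plus sort-based most_common; it trades A's simplicity for avoiding the per-position slice comparisons.
import Mathlib
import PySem

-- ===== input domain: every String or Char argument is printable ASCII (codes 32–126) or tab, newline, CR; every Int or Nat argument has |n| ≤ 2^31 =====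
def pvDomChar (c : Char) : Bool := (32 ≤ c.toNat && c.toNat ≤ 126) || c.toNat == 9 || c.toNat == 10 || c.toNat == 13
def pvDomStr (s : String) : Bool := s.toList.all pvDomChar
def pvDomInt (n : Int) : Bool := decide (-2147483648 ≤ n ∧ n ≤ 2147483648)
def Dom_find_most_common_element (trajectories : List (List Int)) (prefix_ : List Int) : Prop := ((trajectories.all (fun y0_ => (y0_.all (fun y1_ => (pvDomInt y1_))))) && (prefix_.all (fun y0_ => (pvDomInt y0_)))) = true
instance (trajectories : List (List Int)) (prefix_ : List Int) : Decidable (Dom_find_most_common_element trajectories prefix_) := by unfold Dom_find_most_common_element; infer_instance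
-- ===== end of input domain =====

-- B replaces A's slide-a-window-and-compare-a-slice scan by a KMP automaton: a failure
-- table for the prefix built once, one left-to-right pass per trajectory counting next
-- elements in a dict, and a first-max scan for the winner; same value on every input.

-- ===== PORT A =====
def find_most_common_element (trajectories : List (List Int)) (prefix_ : List Int) : Option Int :=
  let prefix_len : Int := PySem.List.len prefix_
  let next_elements : List Int := trajectories.foldl (fun acc trajectory =>
    (PySem.List.pyRange 0 (PySem.List.len trajectory - prefix_len) 1).foldl (fun acc i =>
      if PySem.List.slice trajectory (some i) (some (i + prefix_len)) = prefix_ then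
        acc ++ [PySem.List.pyGetD trajectory (i + prefix_len) 0]
      else acc) acc) []
  if next_elements ≠ [] then
    ((PySem.List.sorted (PySem.Dict.counter next_elements).items (fun p => p.2) true).head?).map (fun p => p.1)
  else none

-- ===== PORT B =====
-- the table-walk 'while b > 0 and prefix[b] != c: b = fail[b]' (fuel only makes the
-- recursion total; the starting b is always enough fuel since table values decrease)
def pvChase (P : List Int) (tab : List Nat) (c : Int) : Nat → Nat → Nat
  | 0, b => b
  | fuel+1, b => if b ≠ 0 ∧ P.getD b 0 ≠ c then pvChase P tab c fuel (tab.getD b 0) else b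

-- the failure-table build loop: pvKTab P n = fail[0..n]
def pvKTab (P : List Int) : Nat → List Nat
  | 0 => [0]
  | 1 => [0, 0]
  | n+2 =>
    let tab := pvKTab P (n+1)
    let b := pvChase P tab (P.getD (n+1) 0) (tab.getD (n+1) 0) (tab.getD (n+1) 0)
    tab ++ [if P.getD b 0 = P.getD (n+1) 0 then b + 1 else 0]

-- the scan's automaton advance: 'while q and (q == p or prefix[q] != c): q = fail[q]'
-- then 'q+1 if q < p and prefix[q] == c else 0' (fuel again only for totality)
def pvStepT (P : List Int) (tab : List Nat) : Nat → Nat → Int → Nat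
  | 0, q, c => if q < P.length ∧ P.getD q 0 = c then q + 1 else 0
  | fuel+1, q, c =>
    if q ≠ 0 ∧ (q = P.length ∨ P.getD q 0 ≠ c) then pvStepT P tab fuel (tab.getD q 0) c
    else if q < P.length ∧ P.getD q 0 = c then q + 1 else 0

def find_most_common_element_alt (trajectories : List (List Int)) (prefix_ : List Int) : Option Int :=
  let p := prefix_.length
  let fail : List Nat := pvKTab prefix_ p
  let counts : PySem.Dict Int Int := trajectories.foldl (fun d trajectory =>
    (trajectory.foldl (fun (st : PySem.Dict Int Int × Nat) c =>
        ((if st.2 = p then st.1.insert c (st.1.getD c 0 + 1) else st.1), pvStepT prefix_ fail st.2 st.2 c))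
      (d, 0)).1) PySem.Dict.empty
  (counts.items.foldl (fun (best : Option (Int × Int)) kv =>
      match best with
      | none => some kv
      | some b => if b.2 < kv.2 then some kv else some b) none).map (fun b => b.1)

-- ===== PRECONDITION & SPEC =====
def Spec_find_most_common_element (trajectories : List (List Int)) (prefix_ : List Int) (out : Option Int) : Prop := out = find_most_common_element_alt trajectories prefix_
instance (trajectories : List (List Int)) (prefix_ : List Int) (out : Option Int) : Decidable (Spec_find_most_common_element trajectories prefix_ out) := by unfold Spec_find_most_common_element; infer_instance

-- ===== CLAIM (what is proved, stated in full; the proofs are below) =====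
def Claim_equal_find_most_common_element : Prop := ∀ (trajectories : List (List Int)) (prefix_ : List Int), Dom_find_most_common_element trajectories prefix_ → Spec_find_most_common_element trajectories prefix_ (find_most_common_element trajectories prefix_)

-- ===== LEMMAS AND PROOFS =====

-- largest-border search used by the correctness proofs: pvFail P q is the greatest
-- b < q with P[:b] == P[q-b:q] (the true failure value; B's table is proved equal to it)
def pvFailFrom (P : List Int) (q : Nat) : Nat → Nat
  | 0 => 0
  | b+1 => if P.take (b+1) ≠ (P.drop (q - (b+1))).take (b+1) then pvFailFrom P q b else b+1

def pvFail (P : List Int) (q : Nat) : Nat := pvFailFrom P q (q - 1)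

theorem pvFailFrom_le (P : List Int) (q : Nat) : ∀ b, pvFailFrom P q b ≤ b
  | 0 => Nat.le_refl 0
  | b+1 => by
      unfold pvFailFrom
      split
      · exact Nat.le_trans (pvFailFrom_le P q b) (Nat.le_succ b)
      · exact Nat.le_refl _

theorem pvFail_lt (P : List Int) (q : Nat) (h : q ≠ 0) : pvFail P q < q := by
  have := pvFailFrom_le P q (q - 1); unfold pvFail; omega

-- reference automaton advance, with the true failure function
def pvStep (P : List Int) (q : Nat) (c : Int) : Nat :=
  if h : q ≠ 0 ∧ (q = P.length ∨ P.getD q 0 ≠ c) then pvStep P (pvFail P q) c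
  else if q < P.length ∧ P.getD q 0 = c then q + 1 else 0
termination_by q
decreasing_by exact pvFail_lt P q h.1

-- k is a "live automaton state" for processed text s: the length-k prefix of P is a suffix of s
def pvCand (P s : List Int) (k : Nat) : Prop := k ≤ P.length ∧ P.take k <:+ s

theorem pvCand_zero (P s : List Int) : pvCand P s 0 := ⟨Nat.zero_le _, by simp⟩

theorem pvCand_len_le (P s : List Int) {k : Nat} (h : pvCand P s k) : k ≤ s.length := by
  have h1 := h.2.length_le
  have h2 := h.1
  simp only [List.length_take] at h1
  omega

theorem pvBorder_iff (P : List Int) (k q : Nat) (hk : k ≤ q) (hq : q ≤ P.length) :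
    P.take k <:+ P.take q ↔ P.take k = (P.drop (q - k)).take k := by
  have h1 : (P.take q).drop ((P.take q).length - (P.take k).length) = (P.drop (q - k)).take k := by
    rw [List.length_take, List.length_take, Nat.min_eq_left hq, Nat.min_eq_left (hk.trans hq),
      List.drop_take]
    congr 1
    omega
  rw [List.suffix_iff_eq_drop, h1]

theorem pvFailFrom_pred (P : List Int) (q : Nat) :
    ∀ b, P.take (pvFailFrom P q b) = (P.drop (q - pvFailFrom P q b)).take (pvFailFrom P q b)
  | 0 => by simp [pvFailFrom]
  | b+1 => by
      unfold pvFailFrom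
      split
      · exact pvFailFrom_pred P q b
      · next h => exact not_ne_iff.mp h

theorem le_pvFailFrom (P : List Int) (q : Nat) :
    ∀ b k, k ≤ b → P.take k = (P.drop (q - k)).take k → k ≤ pvFailFrom P q b
  | 0, k => by intro hk _; simpa [pvFailFrom] using hk
  | b+1, k => by
      intro hk hpred
      unfold pvFailFrom
      split
      · next h =>
        rcases Nat.lt_or_ge k (b+1) with hlt | hge
        · exact le_pvFailFrom P q b k (by omega) hpred
        · have hkb : k = b + 1 := by omega
          subst hkb
          exact absurd hpred h
      · exact hk

theorem pvCand_succ_iff (P s : List Int) (c : Int) (k : Nat) :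
    pvCand P (s ++ [c]) (k+1) ↔ pvCand P s k ∧ k < P.length ∧ P.getD k 0 = c := by
  constructor
  · rintro ⟨hlen, hsuf⟩
    have hk : k < P.length := hlen
    rw [List.take_succ_eq_append_getElem hk] at hsuf
    obtain ⟨t, ht⟩ := hsuf
    rw [← List.append_assoc] at ht
    have h2 := List.append_singleton_inj.mp ht
    exact ⟨⟨Nat.le_of_lt hk, ⟨t, h2.1⟩⟩, hk, by rw [List.getD_eq_getElem _ _ hk]; exact h2.2⟩
  · rintro ⟨⟨_, ⟨t, ht⟩⟩, hk, hc⟩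
    refine ⟨hk, ⟨t, ?_⟩⟩
    rw [List.take_succ_eq_append_getElem hk, ← List.append_assoc, ht]
    rw [List.getD_eq_getElem _ _ hk] at hc
    rw [hc]

theorem pvCand_le (P s : List Int) {k q : Nat} (hk : pvCand P s k) (hq : pvCand P s q)
    (h : k ≤ q) : P.take k <:+ P.take q := by
  have hsl : q ≤ s.length := pvCand_len_le P s hq
  have e1 : P.take k = s.drop (s.length - k) := by
    have h2 := hk.2
    rw [List.suffix_iff_eq_drop] at h2
    rwa [List.length_take, Nat.min_eq_left hk.1] at h2
  have e2 : P.take q = s.drop (s.length - q) := by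
    have h2 := hq.2
    rw [List.suffix_iff_eq_drop] at h2
    rwa [List.length_take, Nat.min_eq_left hq.1] at h2
  rw [e1, e2]
  have e3 : s.drop (s.length - k) = (s.drop (s.length - q)).drop (q - k) := by
    rw [List.drop_drop]
    congr 1
    omega
  rw [e3]
  exact List.drop_suffix _ _

theorem pvStep_spec (P s : List Int) (c : Int) :
    ∀ q, pvCand P s q → (∀ k, pvCand P s k → k < P.length → P.getD k 0 = c → k ≤ q) →
      pvCand P (s ++ [c]) (pvStep P q c) ∧ ∀ k, pvCand P (s ++ [c]) k → k ≤ pvStep P q c := by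
  intro q
  induction q using Nat.strong_induction_on with
  | _ q IH =>
    intro hq hmax
    rw [pvStep]
    split
    · next h =>
      have hfl : pvFail P q < q := pvFail_lt P q h.1
      have hpred : P.take (pvFail P q) = (P.drop (q - pvFail P q)).take (pvFail P q) :=
        pvFailFrom_pred P q (q - 1)
      apply IH (pvFail P q) hfl
      · refine ⟨Nat.le_trans (Nat.le_of_lt hfl) hq.1, ?_⟩
        have hb : P.take (pvFail P q) <:+ P.take q :=
          (pvBorder_iff P _ q (Nat.le_of_lt hfl) hq.1).mpr hpred
        exact hb.trans hq.2
      · intro k hk hkl hkc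
        have hkq : k ≤ q := hmax k hk hkl hkc
        have hkltq : k < q := by
          rcases h.2 with h2 | h2
          · omega
          · rcases Nat.lt_or_ge k q with h3 | h3
            · exact h3
            · have : k = q := by omega
              subst this
              exact absurd hkc h2
        have hb : P.take k <:+ P.take q := pvCand_le P s hk hq (Nat.le_of_lt hkltq)
        have hp2 := (pvBorder_iff P k q (Nat.le_of_lt hkltq) hq.1).mp hb
        exact le_pvFailFrom P q (q - 1) k (by omega) hp2
    · next h =>
      split
      · next h2 =>
        refine ⟨(pvCand_succ_iff P s c q).mpr ⟨hq, h2.1, h2.2⟩, ?_⟩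
        intro k hk
        match k with
        | 0 => exact Nat.zero_le _
        | j+1 =>
          obtain ⟨hj, hjl, hjc⟩ := (pvCand_succ_iff P s c j).mp hk
          have := hmax j hj hjl hjc
          omega
      · next h2 =>
        have hq0 : q = 0 := by
          by_contra hq0
          apply h2
          rcases not_and_or.mp h with h3 | h3
          · exact absurd (not_not.mp h3) hq0
          · rw [not_or, not_not] at h3
            exact ⟨Nat.lt_of_le_of_ne hq.1 h3.1, h3.2⟩
        refine ⟨pvCand_zero P (s ++ [c]), ?_⟩
        intro k hk
        match k with
        | 0 => exact Nat.le_refl 0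
        | j+1 =>
          obtain ⟨hj, hjl, hjc⟩ := (pvCand_succ_iff P s c j).mp hk
          have hj0 : j = 0 := by have := hmax j hj hjl hjc; omega
          subst hj0
          subst hq0
          exact absurd ⟨hjl, hjc⟩ h2

-- automaton state after processing s
def pvQ (P s : List Int) : Nat := s.foldl (fun q c => pvStep P q c) 0

theorem pvQ_spec (P : List Int) : ∀ s, pvCand P s (pvQ P s) ∧ ∀ k, pvCand P s k → k ≤ pvQ P s := by
  intro s
  induction s using List.reverseRecOn with
  | nil =>
    refine ⟨pvCand_zero P [], ?_⟩
    intro k hk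
    have h2 := hk.2
    rw [List.suffix_nil] at h2
    rcases List.take_eq_nil_iff.mp h2 with h3 | h3
    · omega
    · have := hk.1; simp [h3] at this; omega
  | append_singleton s c IHs =>
    have h := pvStep_spec P s c (pvQ P s) IHs.1 (fun k hk _ _ => IHs.2 k hk)
    simpa [pvQ, List.foldl_append] using h

theorem pvStep_Q (P s : List Int) (c : Int) : pvStep P (pvQ P s) c = pvQ P (s ++ [c]) := by
  simp [pvQ, List.foldl_append]

theorem pvQ_eq_len_iff (P s : List Int) : pvQ P s = P.length ↔ P <:+ s := by
  obtain ⟨⟨hle, hsuf⟩, hmax⟩ := pvQ_spec P s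
  constructor
  · intro h
    rw [h, List.take_length] at hsuf
    exact hsuf
  · intro h
    exact Nat.le_antisymm hle (hmax _ ⟨Nat.le_refl _, by rwa [List.take_length]⟩)

theorem pv_suffix_suffix {u v s : List Int} (hu : u <:+ s) (hv : v <:+ s)
    (h : u.length ≤ v.length) : u <:+ v := by
  have hvl := hv.length_le
  have hu' := List.suffix_iff_eq_drop.mp hu
  have hv' := List.suffix_iff_eq_drop.mp hv
  rw [List.suffix_iff_eq_drop]
  calc u = s.drop (s.length - u.length) := hu'
    _ = (s.drop (s.length - v.length)).drop (v.length - u.length) := by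
        rw [List.drop_drop]; congr 1; omega
    _ = v.drop (v.length - u.length) := by rw [← hv']

theorem pvStep_le (P : List Int) (c : Int) : ∀ q, pvStep P q c ≤ P.length := by
  intro q
  induction q using Nat.strong_induction_on with
  | _ q IH =>
    rw [pvStep]
    split
    · next h => exact IH _ (pvFail_lt P q h.1)
    · split
      · next h2 => omega
      · omega

-- the failure value is the automaton state on the tail of the prefix read so far
theorem pv_fail_eq_Q (P : List Int) (q : Nat) (h1 : 1 ≤ q) (h2 : q ≤ P.length) :
    pvFail P q = pvQ P ((P.take q).drop 1) := by
  have htlen : ((P.take q).drop 1).length = q - 1 := by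
    rw [List.length_drop, List.length_take, Nat.min_eq_left h2]
  have hts : (P.take q).drop 1 <:+ P.take q := List.drop_suffix 1 _
  obtain ⟨hcand, hmax⟩ := pvQ_spec P ((P.take q).drop 1)
  have hfle : pvFail P q ≤ q - 1 := pvFailFrom_le P q (q - 1)
  apply Nat.le_antisymm
  · have hpred : P.take (pvFail P q) = (P.drop (q - pvFail P q)).take (pvFail P q) :=
      pvFailFrom_pred P q (q - 1)
    have hb : P.take (pvFail P q) <:+ P.take q :=
      (pvBorder_iff P _ q (by omega) h2).mpr hpred
    refine hmax _ ⟨by omega, pv_suffix_suffix hb hts ?_⟩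
    rw [List.length_take, htlen, Nat.min_eq_left (by omega)]
    omega
  · have hql : pvQ P ((P.take q).drop 1) ≤ q - 1 := by
      have := pvCand_len_le P _ hcand
      omega
    have hbq : P.take (pvQ P ((P.take q).drop 1)) <:+ P.take q := hcand.2.trans hts
    exact le_pvFailFrom P q (q - 1) _ (by omega)
      ((pvBorder_iff P _ q (by omega) h2).mp hbq)

theorem pvFail_succ (P : List Int) (q : Nat) (h1 : 1 ≤ q) (h2 : q + 1 ≤ P.length) :
    pvStep P (pvFail P q) (P.getD q 0) = pvFail P (q + 1) := by
  rw [pv_fail_eq_Q P q h1 (by omega), pv_fail_eq_Q P (q+1) (by omega) h2, pvStep_Q]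
  congr 1
  rw [List.take_succ_eq_append_getElem (by omega : q < P.length),
    List.drop_append_of_le_length (by rw [List.length_take]; omega),
    List.getD_eq_getElem P 0 (by omega : q < P.length)]

theorem pvKTab_length (P : List Int) : ∀ n, (pvKTab P n).length = n + 1
  | 0 => rfl
  | 1 => rfl
  | n+2 => by simp [pvKTab, pvKTab_length P (n+1)]

theorem pvChase_spec (P : List Int) (tab : List Nat) (c : Int) :
    ∀ b, b < P.length → (∀ j, j ≤ b → tab.getD j 0 = pvFail P j) → ∀ fuel, b ≤ fuel →
    (if P.getD (pvChase P tab c fuel b) 0 = c then pvChase P tab c fuel b + 1 else 0)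
      = pvStep P b c := by
  intro b
  induction b using Nat.strong_induction_on with
  | _ b IH =>
    intro hb htab fuel hfuel
    by_cases h : b ≠ 0 ∧ (b = P.length ∨ P.getD b 0 ≠ c)
    · rw [pvStep, dif_pos h]
      have hbc : P.getD b 0 ≠ c := by
        rcases h.2 with h2 | h2
        · exact absurd h2 (by omega)
        · exact h2
      obtain ⟨fuel', rfl⟩ : ∃ f', fuel = f' + 1 := ⟨fuel - 1, by omega⟩
      have hlt := pvFail_lt P b h.1
      rw [show pvChase P tab c (fuel' + 1) b = pvChase P tab c fuel' (tab.getD b 0) by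
        rw [pvChase, if_pos ⟨h.1, hbc⟩]]
      rw [htab b (Nat.le_refl b)]
      exact IH (pvFail P b) hlt (by omega)
        (fun j hj => htab j (by omega)) fuel' (by omega)
    · rw [pvStep, dif_neg h]
      have hstop : pvChase P tab c fuel b = b := by
        cases fuel with
        | zero => rfl
        | succ f =>
          rw [pvChase]
          rw [if_neg (fun hc => h ⟨hc.1, Or.inr hc.2⟩)]
      rw [hstop]
      by_cases hc : P.getD b 0 = c
      · rw [if_pos hc, if_pos ⟨hb, hc⟩]
      · rw [if_neg hc, if_neg (fun hh => hc hh.2)]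

theorem pvKTab_getD (P : List Int) :
    ∀ n, n ≤ P.length → ∀ q, q ≤ n → (pvKTab P n).getD q 0 = pvFail P q
  | 0 => by
      intro _ q hq
      have : q = 0 := by omega
      subst this
      rfl
  | 1 => by
      intro _ q hq
      match q, hq with
      | 0, _ => rfl
      | 1, _ => rfl
  | n+2 => by
      intro hn q hq
      have IH := pvKTab_getD P (n+1) (by omega)
      have hlen := pvKTab_length P (n+1)
      simp only [pvKTab]
      by_cases hq2 : q ≤ n + 1
      · rw [List.getD_append _ _ _ _ (by omega)]
        exact IH q hq2
      · have hq3 : q = n + 2 := by omega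
        subst hq3
        rw [List.getD_append_right _ _ _ _ (by omega), hlen]
        have hb0 : (pvKTab P (n+1)).getD (n+1) 0 = pvFail P (n+1) := IH (n+1) (Nat.le_refl _)
        have hlt : pvFail P (n+1) < n + 1 := pvFail_lt P (n+1) (by omega)
        rw [hb0]
        have hchase := pvChase_spec P (pvKTab P (n+1)) (P.getD (n+1) 0) (pvFail P (n+1))
          (by omega) (fun j hj => IH j (by omega)) (pvFail P (n+1)) (Nat.le_refl _)
        simpa using hchase.trans (pvFail_succ P (n+1) (by omega) hn)

theorem pvStepT_eq (P : List Int) (tab : List Nat) (c : Int) :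
    ∀ q, (∀ j, j ≤ q → tab.getD j 0 = pvFail P j) → ∀ fuel, q ≤ fuel →
      pvStepT P tab fuel q c = pvStep P q c := by
  intro q
  induction q using Nat.strong_induction_on with
  | _ q IH =>
    intro htab fuel hfuel
    by_cases h : q ≠ 0 ∧ (q = P.length ∨ P.getD q 0 ≠ c)
    · rw [pvStep, dif_pos h]
      obtain ⟨fuel', rfl⟩ : ∃ f', fuel = f' + 1 := ⟨fuel - 1, by omega⟩
      have hlt := pvFail_lt P q h.1
      rw [show pvStepT P tab (fuel' + 1) q c = pvStepT P tab fuel' (tab.getD q 0) c by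
        rw [pvStepT, if_pos h]]
      rw [htab q (Nat.le_refl q)]
      exact IH (pvFail P q) hlt (fun j hj => htab j (by omega)) fuel' (by omega)
    · rw [pvStep, dif_neg h]
      cases fuel with
      | zero => rfl
      | succ f => rw [pvStepT, if_neg h]

-- the next elements B counts while scanning t from state q, in order
def pvEmit (P : List Int) : List Int → Nat → List Int
  | [], _ => []
  | c :: t, q => (if q = P.length then [c] else []) ++ pvEmit P t (pvStep P q c)

theorem pvScan_fst (P : List Int) : ∀ (t : List Int) (d : PySem.Dict Int Int) (q : Nat),
    (t.foldl (fun (st : PySem.Dict Int Int × Nat) c =>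
        ((if st.2 = P.length then st.1.insert c (st.1.getD c 0 + 1) else st.1), pvStep P st.2 c)) (d, q)).1
    = (pvEmit P t q).foldl (fun d x => d.insert x (d.getD x 0 + 1)) d := by
  intro t
  induction t with
  | nil => intro d q; rfl
  | cons c t IH =>
    intro d q
    simp only [List.foldl_cons, pvEmit, List.foldl_append]
    by_cases h : q = P.length
    · simp only [if_pos h, List.foldl_cons, List.foldl_nil]
      exact IH _ _
    · simp only [if_neg h, List.foldl_nil]
      exact IH _ _

theorem pvEmit_eq (P : List Int) : ∀ (t s : List Int),
    pvEmit P t (pvQ P s) = (List.range t.length).filterMap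
      (fun i => if P <:+ s ++ t.take i then some (t.getD i 0) else none) := by
  intro t
  induction t with
  | nil => intro s; simp [pvEmit]
  | cons c t IH =>
    intro s
    have h0 : pvStep P (pvQ P s) c = pvQ P (s ++ [c]) := pvStep_Q P s c
    simp only [pvEmit, h0, IH (s ++ [c])]
    rw [List.length_cons, List.range_succ_eq_map]
    rw [List.filterMap_cons, List.filterMap_map]
    have htail : ∀ i : Nat,
        (if P <:+ s ++ (c :: t).take (i+1) then some ((c :: t).getD (i+1) 0) else none)
          = (if P <:+ (s ++ [c]) ++ t.take i then some (t.getD i 0) else none) := by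
      intro i
      have e1 : s ++ (c :: t).take (i+1) = (s ++ [c]) ++ t.take i := by
        simp [List.take_succ_cons]
      rw [e1, List.getD_cons_succ]
    have e0 : s ++ (c :: t).take 0 = s := by simp
    by_cases hs : P <:+ s
    · rw [if_pos ((pvQ_eq_len_iff P s).mpr hs)]
      simp only [List.take_zero, List.append_nil, hs, if_true, List.singleton_append]
      have hfn : (fun i => if P <:+ s ++ [c] ++ List.take i t then some (t.getD i 0) else none)
          = ((fun i => if P <:+ s ++ List.take i (c :: t) then some ((c :: t).getD i 0) else none) ∘ Nat.succ) :=
        funext fun i => (htail i).symm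
      rw [hfn]
      simp
    · rw [if_neg (fun h => hs ((pvQ_eq_len_iff P s).mp h))]
      simp only [List.take_zero, List.append_nil, hs, if_false, List.nil_append]
      have hfn : (fun i => if P <:+ s ++ [c] ++ List.take i t then some (t.getD i 0) else none)
          = ((fun i => if P <:+ s ++ List.take i (c :: t) then some ((c :: t).getD i 0) else none) ∘ Nat.succ) :=
        funext fun i => (htail i).symm
      rw [hfn]

theorem pv_filterMap_if {α : Type} (l : List Nat) (c : Nat → Prop) [DecidablePred c] (v : Nat → α) :
    l.filterMap (fun i => if c i then some (v i) else none)
      = (l.filter (fun i => decide (c i))).map v := by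
  induction l with
  | nil => rfl
  | cons x t IH => by_cases h : c x <;> simp [h, IH]

-- the window condition of A at start j is the suffix condition of B at end p+j
theorem pv_window_iff (t P : List Int) (j : Nat) (h : j + P.length ≤ t.length) :
    ((t.drop j).take P.length = P) ↔ P <:+ t.take (P.length + j) := by
  rw [List.suffix_iff_eq_drop]
  have hl : (t.take (P.length + j)).length = P.length + j := by
    rw [List.length_take]; exact Nat.min_eq_left (by omega)
  rw [hl]
  have e1 : (t.take (P.length + j)).drop (P.length + j - P.length) = (t.drop j).take P.length := by
    have e2 : P.length + j - P.length = j := by omega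
    rw [e2, List.drop_take]
    congr 1
    omega
  rw [e1, eq_comm]

-- per-trajectory: B's emitted list equals A's appended list
theorem pvEmit_eq_A (P t : List Int) :
    pvEmit P t 0 = ((PySem.List.pyRange 0 ((t.length : Int) - (P.length : Int)) 1).filter
        (fun j => decide (PySem.List.slice t (some j) (some (j + (P.length : Int))) = P))).map
        (fun j => PySem.List.pyGetD t (j + (P.length : Int)) 0) := by
  have h1 : pvEmit P t 0 = (List.range t.length).filterMap
      (fun i => if P <:+ t.take i then some (t.getD i 0) else none) := by
    simpa using pvEmit_eq P t []
  rw [h1, pv_filterMap_if, PySem.List.pyRange_zero]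
  have hm : ((t.length : Int) - (P.length : Int)).toNat = t.length - P.length := by omega
  rw [hm, List.filter_map, List.map_map]
  by_cases hp : P.length ≤ t.length
  · have hr : List.range t.length
        = List.range P.length ++ (List.range (t.length - P.length)).map (P.length + ·) := by
      conv_lhs => rw [show t.length = P.length + (t.length - P.length) by omega]
      exact List.range_add
    rw [hr, List.filter_append]
    have hfilter0 : (List.range P.length).filter (fun i => decide (P <:+ t.take i)) = [] := by
      rw [List.filter_eq_nil_iff]
      intro i hi
      simp only [decide_eq_true_eq]
      intro hsuf
      have hle := hsuf.length_le
      rw [List.length_take] at hle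
      have := List.mem_range.mp hi
      omega
    rw [hfilter0, List.nil_append, List.filter_map, List.map_map]
    have hfc : ∀ j ∈ List.range (t.length - P.length),
        ((fun i => decide (P <:+ t.take i)) ∘ (P.length + ·)) j
          = ((fun j => decide (PySem.List.slice t (some j) (some (j + (P.length : Int))) = P))
              ∘ (fun k : Nat => (k : Int))) j := by
      intro j hj
      have hj' : j < t.length - P.length := List.mem_range.mp hj
      simp only [Function.comp_apply, decide_eq_decide]
      rw [PySem.List.slice_natCast_add]
      exact (pv_window_iff t P j (by omega)).symm
    rw [List.filter_congr hfc]
    have hval : ((fun i => t.getD i 0) ∘ (P.length + ·))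
        = ((fun j => PySem.List.pyGetD t (j + (P.length : Int)) 0) ∘ (fun k : Nat => (k : Int))) := by
      funext j
      simp only [Function.comp_apply]
      have hc : ((j : Int) + (P.length : Int)) = ((j + P.length : Nat) : Int) := by push_cast; ring
      rw [hc, PySem.List.pyGetD_natCast, Nat.add_comm]
    rw [hval]
  · have hz : t.length - P.length = 0 := by omega
    have hfilter0 : (List.range t.length).filter (fun i => decide (P <:+ t.take i)) = [] := by
      rw [List.filter_eq_nil_iff]
      intro i hi
      simp only [decide_eq_true_eq]
      intro hsuf
      have hle := hsuf.length_le
      rw [List.length_take] at hle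
      have := List.mem_range.mp hi
      omega
    rw [hz, hfilter0]
    rfl

-- head of insertBy: the inserted element lands in front iff `before x (old head)`
theorem pv_head_insertBy {α : Type} (before : α → α → Bool) (x : α) (l : List α) :
    (PySem.List.insertBy before x l).head? =
      some (match l.head? with
            | none => x
            | some y => if before x y then x else y) := by
  cases l with
  | nil => simp [PySem.List.insertBy]
  | cons y t =>
    by_cases h : before x y = true <;> simp [PySem.List.insertBy, h]

-- head of the insertBy fold = running first-max fold
theorem pv_head_foldl_insertBy {α : Type} (before : α → α → Bool) :
    ∀ (xs : List α) (acc : List α),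
    (xs.foldl (fun a x => PySem.List.insertBy before x a) acc).head? =
      xs.foldl (fun m x =>
        match m with
        | none => some x
        | some y => if before x y then some x else some y) acc.head? := by
  intro xs
  induction xs with
  | nil => intro acc; rfl
  | cons x t ih =>
    intro acc
    simp only [List.foldl_cons]
    rw [ih]
    congr 1
    rw [pv_head_insertBy]
    cases acc with
    | nil => rfl
    | cons a r => by_cases h : before x a = true <;> simp [h]

-- Python's sorted(..., reverse=True)[0] is Python's max(...) (first maximal element)
theorem pv_head_sorted_rev_eq_max? {α κ : Type} [LinearOrder κ] (xs : List α) (key : α → κ) :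
    (PySem.List.sorted xs key true).head? = PySem.List.max? xs key := by
  have h := pv_head_foldl_insertBy (fun a b => decide (key b < key a)) xs []
  simp only [PySem.List.sorted, if_true]
  rw [h]
  simp only [PySem.List.max?]
  congr 1
  funext m x
  cases m <;> simp

-- B's first-max scan over the dict items is Python's max(items, key=snd)
theorem pv_best_eq (l : List (Int × Int)) :
    l.foldl (fun best kv => match best with
      | none => some kv
      | some b => if b.2 < kv.2 then some kv else some b) none
    = PySem.List.max? l (fun p => p.2) := by
  rw [PySem.List.max?]
  exact PySem.List.foldl_congr_mem _ _ _ _ (fun acc x _ => by cases acc <;> rfl)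

-- ===== VERDICT (by name: the statement is the Claim_ definition above) =====
theorem find_most_common_element_spec : Claim_equal_find_most_common_element := by
  intro trajectories prefix_ _
  unfold Spec_find_most_common_element find_most_common_element find_most_common_element_alt
  simp only [PySem.List.len_eq]
  -- A's collected next-element list
  set ne := trajectories.foldl (fun acc trajectory =>
    (PySem.List.pyRange 0 ((trajectory.length : Int) - (prefix_.length : Int)) 1).foldl (fun acc i =>
      if PySem.List.slice trajectory (some i) (some (i + (prefix_.length : Int))) = prefix_ then
        acc ++ [PySem.List.pyGetD trajectory (i + (prefix_.length : Int)) 0]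
      else acc) acc) [] with hne
  -- A's per-trajectory contribution, in closed form
  have hinner : ∀ (acc : List Int) (t : List Int),
      (PySem.List.pyRange 0 ((t.length : Int) - (prefix_.length : Int)) 1).foldl (fun acc i =>
        if PySem.List.slice t (some i) (some (i + (prefix_.length : Int))) = prefix_ then
          acc ++ [PySem.List.pyGetD t (i + (prefix_.length : Int)) 0]
        else acc) acc
      = acc ++ pvEmit prefix_ t 0 := by
    intro acc t
    rw [PySem.List.foldl_append_ite
      (p := fun i => PySem.List.slice t (some i) (some (i + (prefix_.length : Int))) = prefix_)
      (f := fun i => PySem.List.pyGetD t (i + (prefix_.length : Int)) 0), pvEmit_eq_A]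
  have hne2 : ne = trajectories.flatMap (fun t => pvEmit prefix_ t 0) := by
    rw [hne]
    have key : ∀ (ts : List (List Int)) (acc : List Int),
        ts.foldl (fun acc trajectory =>
          (PySem.List.pyRange 0 ((trajectory.length : Int) - (prefix_.length : Int)) 1).foldl (fun acc i =>
            if PySem.List.slice trajectory (some i) (some (i + (prefix_.length : Int))) = prefix_ then
              acc ++ [PySem.List.pyGetD trajectory (i + (prefix_.length : Int)) 0]
            else acc) acc) acc
        = acc ++ ts.flatMap (fun t => pvEmit prefix_ t 0) := by
      intro ts
      induction ts with
      | nil => intro acc; simp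
      | cons t ts IH =>
        intro acc
        simp only [List.foldl_cons, List.flatMap_cons]
        rw [hinner acc t, IH, List.append_assoc]
    simpa using key trajectories []
  -- the table agrees with the true failure function
  have htabOK : ∀ j, j ≤ prefix_.length →
      (pvKTab prefix_ prefix_.length).getD j 0 = pvFail prefix_ j :=
    fun j hj => pvKTab_getD prefix_ prefix_.length (Nat.le_refl _) j hj
  -- so B's table-walk advance is the reference advance along any scan
  have hbody : ∀ (t : List Int) (d : PySem.Dict Int Int) (q : Nat), q ≤ prefix_.length →
      t.foldl (fun (st : PySem.Dict Int Int × Nat) c =>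
          ((if st.2 = prefix_.length then st.1.insert c (st.1.getD c 0 + 1) else st.1),
            pvStepT prefix_ (pvKTab prefix_ prefix_.length) st.2 st.2 c)) (d, q)
      = t.foldl (fun (st : PySem.Dict Int Int × Nat) c =>
          ((if st.2 = prefix_.length then st.1.insert c (st.1.getD c 0 + 1) else st.1),
            pvStep prefix_ st.2 c)) (d, q) := by
    intro t
    induction t with
    | nil => intro d q _; rfl
    | cons c t IHt =>
      intro d q hq
      simp only [List.foldl_cons]
      rw [pvStepT_eq prefix_ (pvKTab prefix_ prefix_.length) c q
        (fun j hj => htabOK j (Nat.le_trans hj hq)) q (Nat.le_refl q)]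
      exact IHt _ _ (pvStep_le prefix_ c q)
  -- B's counts dict is Counter(ne)
  have hBcounts :
      trajectories.foldl (fun d trajectory =>
        (trajectory.foldl (fun (st : PySem.Dict Int Int × Nat) c =>
            ((if st.2 = prefix_.length then st.1.insert c (st.1.getD c 0 + 1) else st.1),
              pvStepT prefix_ (pvKTab prefix_ prefix_.length) st.2 st.2 c)) (d, 0)).1)
        PySem.Dict.empty
      = PySem.Dict.counter ne := by
    have key2 : ∀ (ts : List (List Int)) (d : PySem.Dict Int Int),
        ts.foldl (fun d trajectory =>
          (trajectory.foldl (fun (st : PySem.Dict Int Int × Nat) c =>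
              ((if st.2 = prefix_.length then st.1.insert c (st.1.getD c 0 + 1) else st.1),
                pvStepT prefix_ (pvKTab prefix_ prefix_.length) st.2 st.2 c)) (d, 0)).1) d
        = (ts.flatMap (fun t => pvEmit prefix_ t 0)).foldl
            (fun d x => d.insert x (d.getD x 0 + 1)) d := by
      intro ts
      induction ts with
      | nil => intro d; rfl
      | cons t ts IH =>
        intro d
        simp only [List.foldl_cons, List.flatMap_cons, List.foldl_append]
        rw [hbody t d 0 (Nat.zero_le _), pvScan_fst prefix_ t d 0, IH]
    rw [key2, ← hne2]
    exact PySem.Dict.foldl_insert_getD_add_one_eq_counter ne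
  rw [hBcounts, pv_best_eq]
  by_cases h : ne = []
  · rw [h]
    simp only [ne_eq, not_true_eq_false, if_false]
    rfl
  · rw [if_pos h, pv_head_sorted_rev_eq_max?]
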